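-- pv_equiv track=rewrite | github.com/venikman/fpf-sync | .github/scripts/collect-report-context.py | resolve_existing_pair_index
-- ===== SOURCE A (Python) =====
-- from typing import Any
--
-- def resolve_existing_pair_index(
--     pairs: list[dict[str, Any]],
--     reports: list[dict[str, Any]],
-- ) -> int:
--     if not reports:
--         return -1
--
--     pair_by_sync = {pair["head"]["commit"]: index for index, pair in enumerate(pairs)}
--     pair_by_upstream = {
--         pair["head"]["upstream_sha"]: index for index, pair in enumerate(pairs)
--     }
--
--     latest_index = -1
--     for report in reports:
--         sync_commit = report.get("sync_commit")
--         upstream_head = report.get("upstream_head_sha")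
--         if sync_commit in pair_by_sync:
--             latest_index = max(latest_index, pair_by_sync[sync_commit])
--         elif upstream_head in pair_by_upstream:
--             latest_index = max(latest_index, pair_by_upstream[upstream_head])
--     return latest_index
-- ===== SOURCE B (Python) =====
-- def resolve_existing_pair_index(pairs, reports):
--     if not reports:
--         return -1
--
--     commits = [pair["head"]["commit"] for pair in pairs]
--     upstreams = [pair["head"]["upstream_sha"] for pair in pairs]
--
--     commit_set = set(commits)
--     sync_seen = {report.get("sync_commit") for report in reports}
--     upstream_seen = {
--         report.get("upstream_head_sha")
--         for report in reports
--         if report.get("sync_commit") not in commit_set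
--     }
--
--     latest = -1
--     for i, (commit, upstream) in enumerate(zip(commits, upstreams)):
--         if commit in sync_seen or upstream in upstream_seen:
--             latest = max(latest, i)
--     return latest
-- ===== Notes on version B (the rewrite author's own statement) =====
-- stated objective: alternative
-- what changed: Inverts the traversal: instead of building two pair-index dicts and looking them up per report, B builds the sets of sync commits and (for reports whose sync_commit matches no pair commit) upstream heads seen in the reports once, then scans the pairs keeping the latest matching index.
import Mathlib
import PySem

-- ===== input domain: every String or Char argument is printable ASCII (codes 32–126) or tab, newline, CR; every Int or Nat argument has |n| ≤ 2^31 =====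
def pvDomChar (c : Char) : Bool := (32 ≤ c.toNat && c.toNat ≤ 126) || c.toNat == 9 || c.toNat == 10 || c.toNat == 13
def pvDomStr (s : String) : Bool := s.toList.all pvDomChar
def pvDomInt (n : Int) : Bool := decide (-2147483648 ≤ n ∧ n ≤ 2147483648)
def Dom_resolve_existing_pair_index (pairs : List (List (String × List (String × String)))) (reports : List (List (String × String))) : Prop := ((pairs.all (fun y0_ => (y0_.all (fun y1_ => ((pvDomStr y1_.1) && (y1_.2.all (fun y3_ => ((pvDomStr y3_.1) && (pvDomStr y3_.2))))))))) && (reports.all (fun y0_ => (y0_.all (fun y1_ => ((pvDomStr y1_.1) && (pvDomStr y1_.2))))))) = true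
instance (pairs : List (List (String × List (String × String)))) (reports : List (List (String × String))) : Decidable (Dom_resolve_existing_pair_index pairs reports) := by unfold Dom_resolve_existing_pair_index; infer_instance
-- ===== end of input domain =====

-- B inverts the traversal: instead of two index dicts looked up per report, it builds the sets of
-- seen sync-commits / upstream heads from the reports once and then scans the pairs for the latest match.

-- ===== PORT A =====
-- pair["head"]["commit"] / pair["head"]["upstream_sha"]; totalised with defaults, which Pre_ makes unreachable
def pvCommit (p : List (String × List (String × String))) : String :=
  ((p.lookup "head").getD []).lookup "commit" |>.getD ""
def pvUpstream (p : List (String × List (String × String))) : String :=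
  ((p.lookup "head").getD []).lookup "upstream_sha" |>.getD ""

def resolve_existing_pair_index (pairs : List (List (String × List (String × String)))) (reports : List (List (String × String))) : Int :=
  if reports = [] then -1
  else
    let pair_by_sync : PySem.Dict String Int :=
      (PySem.List.enumerate pairs).foldl (fun d ip => d.insert (pvCommit ip.2) ip.1) PySem.Dict.empty
    let pair_by_upstream : PySem.Dict String Int :=
      (PySem.List.enumerate pairs).foldl (fun d ip => d.insert (pvUpstream ip.2) ip.1) PySem.Dict.empty
    reports.foldl (fun latest r =>
      match (r.lookup "sync_commit").bind pair_by_sync.get? with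
      | some j => max latest j
      | none =>
        match (r.lookup "upstream_head_sha").bind pair_by_upstream.get? with
        | some j => max latest j
        | none => latest) (-1)

-- ===== PORT B =====
def resolve_existing_pair_index_alt (pairs : List (List (String × List (String × String)))) (reports : List (List (String × String))) : Int :=
  if reports = [] then -1
  else
    let commits : List String := pairs.map pvCommit
    let upstreams : List String := pairs.map pvUpstream
    let commitSet : PySem.Set String := PySem.Set.ofList commits
    let syncSeen : PySem.Set (Option String) :=
      PySem.Set.ofList (reports.map (fun r => r.lookup "sync_commit"))
    let upstreamSeen : PySem.Set (Option String) :=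
      PySem.Set.ofList ((reports.filter (fun r =>
        match r.lookup "sync_commit" with
        | some c => !(PySem.Set.contains commitSet c)
        | none => true)).map (fun r => r.lookup "upstream_head_sha"))
    (PySem.List.enumerate (commits.zip upstreams)).foldl (fun latest icu =>
      if PySem.Set.contains syncSeen (some icu.2.1) || PySem.Set.contains upstreamSeen (some icu.2.2)
      then max latest icu.1 else latest) (-1)

-- ===== PRECONDITION & SPEC =====
def pvPairOk (p : List (String × List (String × String))) : Bool :=
  match p.lookup "head" with
  | some h => (h.lookup "commit").isSome && (h.lookup "upstream_sha").isSome
  | none => false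

-- Pre_ excludes exactly the inputs where Python A raises KeyError: a nonempty report list together
-- with some pair missing "head", "head"→"commit" or "head"→"upstream_sha".
def Pre_resolve_existing_pair_index (pairs : List (List (String × List (String × String)))) (reports : List (List (String × String))) : Prop :=
  reports = [] ∨ ∀ p ∈ pairs, pvPairOk p = true
instance (pairs : List (List (String × List (String × String)))) (reports : List (List (String × String))) : Decidable (Pre_resolve_existing_pair_index pairs reports) := by unfold Pre_resolve_existing_pair_index; infer_instance

def pvWitness_resolve_existing_pair_index : (List (List (String × List (String × String)))) × (List (List (String × String))) :=
  ([[("head", [("commit", "a"), ("upstream_sha", "b")])]], [[("sync_commit", "a")]])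

def Spec_resolve_existing_pair_index (pairs : List (List (String × List (String × String)))) (reports : List (List (String × String))) (out : Int) : Prop := out = resolve_existing_pair_index_alt pairs reports
instance (pairs : List (List (String × List (String × String)))) (reports : List (List (String × String))) (out : Int) : Decidable (Spec_resolve_existing_pair_index pairs reports out) := by unfold Spec_resolve_existing_pair_index; infer_instance

-- ===== CLAIM (what is proved, stated in full; the proofs are below) =====
def Claim_equal_resolve_existing_pair_index : Prop := ∀ (pairs : List (List (String × List (String × String)))) (reports : List (List (String × String))), Dom_resolve_existing_pair_index pairs reports → Pre_resolve_existing_pair_index pairs reports → Spec_resolve_existing_pair_index pairs reports (resolve_existing_pair_index pairs reports)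

-- ===== LEMMAS AND PROOFS =====

lemma pvFoldlExt {α β : Type} (g1 g2 : β → α → β) (h : ∀ b x, g1 b x = g2 b x) :
    ∀ (l : List α) (a : β), l.foldl g1 a = l.foldl g2 a := by
  intro l
  induction l with
  | nil => intro a; rfl
  | cons x xs ih => intro a; simp only [List.foldl_cons, h, ih]

def pvOptmax {α : Type} (f : α → Option Int) (l : List α) (a : Int) : Int :=
  l.foldl (fun acc x => match f x with | some j => max acc j | none => acc) a

lemma pvOptmax_ge {α : Type} (f : α → Option Int) (l : List α) :
    ∀ a : Int, a ≤ pvOptmax f l a := by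
  induction l with
  | nil => intro a; exact le_refl a
  | cons x xs ih =>
    intro a
    show a ≤ pvOptmax f xs _
    cases hx : f x with
    | none => simpa [pvOptmax, hx] using ih a
    | some j => exact le_trans (le_max_left a j) (by simpa [pvOptmax, hx] using ih (max a j))

lemma pvOptmax_mem_le {α : Type} (f : α → Option Int) (l : List α) :
    ∀ (a : Int) (x : α), x ∈ l → ∀ j, f x = some j → j ≤ pvOptmax f l a := by
  induction l with
  | nil => intro a x hx; cases hx
  | cons y ys ih =>
    intro a x hx j hj
    rcases List.mem_cons.mp hx with h | h
    · subst h
      have : max a j ≤ pvOptmax f ys (max a j) := pvOptmax_ge f ys _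
      have hle : j ≤ pvOptmax f ys (max a j) := le_trans (le_max_right a j) this
      simpa [pvOptmax, hj] using hle
    · cases hy : f y with
      | none => simpa [pvOptmax, hy] using ih a x h j hj
      | some k => simpa [pvOptmax, hy] using ih (max a k) x h j hj

lemma pvOptmax_cases {α : Type} (f : α → Option Int) (l : List α) :
    ∀ a : Int, pvOptmax f l a = a ∨ ∃ x ∈ l, f x = some (pvOptmax f l a) := by
  induction l with
  | nil => intro a; exact Or.inl rfl
  | cons y ys ih =>
    intro a
    cases hy : f y with
    | none =>
      rcases ih a with h | ⟨x, hx, hfx⟩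
      · left; simpa [pvOptmax, hy] using h
      · right; exact ⟨x, List.mem_cons_of_mem _ hx, by simpa [pvOptmax, hy] using hfx⟩
    | some k =>
      rcases ih (max a k) with h | ⟨x, hx, hfx⟩
      · have h' : pvOptmax f (y :: ys) a = max a k := by simpa [pvOptmax, hy] using h
        rcases le_total k a with hka | hak
        · left; rw [h']; exact max_eq_left hka
        · right
          refine ⟨y, List.mem_cons_self, ?_⟩
          rw [h', hy, max_eq_right hak]
      · right; exact ⟨x, List.mem_cons_of_mem _ hx, by simpa [pvOptmax, hy] using hfx⟩

-- the "last hit" fold that a dict comprehension over enumerate amounts to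
def pvG {α : Type} (k : α → String) (s : String) (l : List α) (s0 : Int) (acc : Option Int) : Option Int :=
  (PySem.List.enumerate l s0).foldl (fun acc ip => if s = k ip.2 then some ip.1 else acc) acc

lemma pvDict_get {α : Type} (k : α → String) (l : List α) :
    ∀ (s0 : Int) (d0 : PySem.Dict String Int) (s : String),
      ((PySem.List.enumerate l s0).foldl (fun d ip => d.insert (k ip.2) ip.1) d0).get? s
        = pvG k s l s0 (d0.get? s) := by
  induction l with
  | nil => intro s0 d0 s; simp [pvG, PySem.List.enumerate_nil]
  | cons x xs ih =>
    intro s0 d0 s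
    rw [pvG, PySem.List.enumerate_cons]
    simp only [List.foldl_cons]
    rw [ih (s0 + 1) (d0.insert (k x) s0) s, PySem.Dict.get?_insert]
    rfl

lemma pvG_some {α : Type} (k : α → String) (s : String) (l : List α) :
    ∀ (s0 : Int) (acc : Option Int) (j : Int), pvG k s l s0 acc = some j →
      acc = some j ∨ ∃ m : Nat, ∃ _ : m < l.length, j = s0 + m ∧ s = k l[m] := by
  induction l with
  | nil => intro s0 acc j h; left; simpa [pvG, PySem.List.enumerate_nil] using h
  | cons x xs ih =>
    intro s0 acc j h
    rw [pvG, PySem.List.enumerate_cons] at h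
    simp only [List.foldl_cons] at h
    rcases ih (s0 + 1) _ j h with h' | ⟨m, hm, hj, hs⟩
    · by_cases hx : s = k x
      · right
        have hj0 : j = s0 := by simp [hx] at h'; omega
        exact ⟨0, by simp, by push_cast; omega, by simpa using hx⟩
      · left; simpa [hx] using h'
    · right
      refine ⟨m + 1, by simpa using Nat.succ_lt_succ hm, by omega, by simpa using hs⟩

lemma pvG_mono {α : Type} (k : α → String) (s : String) (l : List α) :
    ∀ (s0 j0 : Int), ∃ j, pvG k s l s0 (some j0) = some j ∧ (j = j0 ∨ s0 ≤ j) := by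
  induction l with
  | nil => intro s0 j0; exact ⟨j0, by simp [pvG, PySem.List.enumerate_nil], Or.inl rfl⟩
  | cons x xs ih =>
    intro s0 j0
    by_cases hx : s = k x
    · rcases ih (s0 + 1) s0 with ⟨j, hj, hor⟩
      refine ⟨j, ?_, Or.inr ?_⟩
      · rw [pvG, PySem.List.enumerate_cons]; simp only [List.foldl_cons, if_pos hx]; exact hj
      · rcases hor with h | h <;> omega
    · rcases ih (s0 + 1) j0 with ⟨j, hj, hor⟩
      refine ⟨j, ?_, ?_⟩
      · rw [pvG, PySem.List.enumerate_cons]; simp only [List.foldl_cons, if_neg hx]; exact hj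
      · rcases hor with h | h
        · exact Or.inl h
        · exact Or.inr (by omega)

lemma pvG_hit {α : Type} (k : α → String) (s : String) (l : List α) :
    ∀ (s0 : Int) (acc : Option Int) (m : Nat), ∀ _ : m < l.length, s = k l[m] →
      ∃ j, pvG k s l s0 acc = some j ∧ s0 + m ≤ j := by
  induction l with
  | nil => intro _ _ m hm; cases hm
  | cons x xs ih =>
    intro s0 acc m hm hs
    cases m with
    | zero =>
      have hx : s = k x := by simpa using hs
      rw [pvG, PySem.List.enumerate_cons]
      simp only [List.foldl_cons, if_pos hx]
      rcases pvG_mono k s xs (s0 + 1) s0 with ⟨j, hj, hor⟩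
      exact ⟨j, hj, by rcases hor with h | h <;> omega⟩
    | succ m' =>
      have hm' : m' < xs.length := by simpa using Nat.lt_of_succ_lt_succ hm
      rcases ih (s0 + 1) (if s = k x then some s0 else acc) m' hm' (by simpa using hs) with ⟨j, hj, hle⟩
      refine ⟨j, ?_, by omega⟩
      rw [pvG, PySem.List.enumerate_cons]
      simp only [List.foldl_cons]
      exact hj

lemma pvG_miss {α : Type} (k : α → String) (s : String) (l : List α) :
    ∀ (s0 : Int) (acc : Option Int), (∀ x ∈ l, s ≠ k x) → pvG k s l s0 acc = acc := by
  induction l with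
  | nil => intro s0 acc _; simp [pvG, PySem.List.enumerate_nil]
  | cons x xs ih =>
    intro s0 acc h
    rw [pvG, PySem.List.enumerate_cons]
    simp only [List.foldl_cons, if_neg (h x (List.mem_cons_self))]
    exact ih (s0 + 1) acc (fun y hy => h y (List.mem_cons_of_mem _ hy))

-- A's per-report contribution
def pvFA (S U : PySem.Dict String Int) (r : List (String × String)) : Option Int :=
  match (r.lookup "sync_commit").bind S.get? with
  | some j => some j
  | none => (r.lookup "upstream_head_sha").bind U.get?

def pvSdict (pairs : List (List (String × List (String × String)))) : PySem.Dict String Int :=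
  (PySem.List.enumerate pairs).foldl (fun d ip => d.insert (pvCommit ip.2) ip.1) PySem.Dict.empty
def pvUdict (pairs : List (List (String × List (String × String)))) : PySem.Dict String Int :=
  (PySem.List.enumerate pairs).foldl (fun d ip => d.insert (pvUpstream ip.2) ip.1) PySem.Dict.empty

lemma pvSdict_get (pairs : List (List (String × List (String × String)))) (s : String) :
    (pvSdict pairs).get? s = pvG pvCommit s pairs 0 none := by
  rw [pvSdict, pvDict_get]; simp [PySem.Dict.get?_empty]

lemma pvUdict_get (pairs : List (List (String × List (String × String)))) (s : String) :
    (pvUdict pairs).get? s = pvG pvUpstream s pairs 0 none := by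
  rw [pvUdict, pvDict_get]; simp [PySem.Dict.get?_empty]

def pvSyncSeen (reports : List (List (String × String))) : PySem.Set (Option String) :=
  PySem.Set.ofList (reports.map (fun r => r.lookup "sync_commit"))
def pvUpSeen (pairs : List (List (String × List (String × String)))) (reports : List (List (String × String))) : PySem.Set (Option String) :=
  PySem.Set.ofList ((reports.filter (fun r =>
    match r.lookup "sync_commit" with
    | some c => !(PySem.Set.contains (PySem.Set.ofList (pairs.map pvCommit)) c)
    | none => true)).map (fun r => r.lookup "upstream_head_sha"))
def pvCond (pairs : List (List (String × List (String × String)))) (reports : List (List (String × String)))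
    (icu : Int × (String × String)) : Bool :=
  PySem.Set.contains (pvSyncSeen reports) (some icu.2.1) || PySem.Set.contains (pvUpSeen pairs reports) (some icu.2.2)

lemma pvA_eq (pairs : List (List (String × List (String × String)))) (reports : List (List (String × String)))
    (hr : ¬ reports = []) :
    resolve_existing_pair_index pairs reports = pvOptmax (pvFA (pvSdict pairs) (pvUdict pairs)) reports (-1) := by
  unfold resolve_existing_pair_index pvOptmax
  rw [if_neg hr]
  show reports.foldl (fun latest r =>
      match (r.lookup "sync_commit").bind (pvSdict pairs).get? with
      | some j => max latest j
      | none =>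
        match (r.lookup "upstream_head_sha").bind (pvUdict pairs).get? with
        | some j => max latest j
        | none => latest) (-1) = _
  refine pvFoldlExt _ _ ?_ reports (-1)
  intro b r
  unfold pvFA
  cases h1 : (r.lookup "sync_commit").bind (pvSdict pairs).get? <;>
    cases h2 : (r.lookup "upstream_head_sha").bind (pvUdict pairs).get? <;>
      rfl

lemma pvB_eq (pairs : List (List (String × List (String × String)))) (reports : List (List (String × String)))
    (hr : ¬ reports = []) :
    resolve_existing_pair_index_alt pairs reports
      = pvOptmax (fun icu => if pvCond pairs reports icu then some icu.1 else none)
          (PySem.List.enumerate ((pairs.map pvCommit).zip (pairs.map pvUpstream))) (-1) := by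
  unfold resolve_existing_pair_index_alt pvOptmax
  rw [if_neg hr]
  show (PySem.List.enumerate ((pairs.map pvCommit).zip (pairs.map pvUpstream))).foldl
      (fun latest icu => if pvCond pairs reports icu then max latest icu.1 else latest) (-1) = _
  refine pvFoldlExt _ _ ?_ _ (-1)
  intro b icu
  cases hc : pvCond pairs reports icu <;> simp [hc]

lemma pvMain (pairs : List (List (String × List (String × String)))) (reports : List (List (String × String)))
    (hr : ¬ reports = []) :
    resolve_existing_pair_index pairs reports = resolve_existing_pair_index_alt pairs reports := by
  rw [pvA_eq pairs reports hr, pvB_eq pairs reports hr]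
  set cs := pairs.map pvCommit with hcs
  set us := pairs.map pvUpstream with hus
  set fB : Int × (String × String) → Option Int :=
    (fun icu => if pvCond pairs reports icu then some icu.1 else none) with hfB
  set enumL := PySem.List.enumerate (cs.zip us) with henumL
  have hzlen : (cs.zip us).length = pairs.length := by simp [hcs, hus]
  have hzget : ∀ (m : Nat) (hm : m < pairs.length),
      (cs.zip us)[m]'(by omega) = (pvCommit (pairs[m]'hm), pvUpstream (pairs[m]'hm)) := by
    intro m hm
    simp [hcs, hus, List.getElem_zip]
  have hmemE : ∀ (m : Nat) (hm : m < pairs.length),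
      ((m : Int), (pvCommit (pairs[m]'hm), pvUpstream (pairs[m]'hm))) ∈ enumL := by
    intro m hm
    rw [henumL]
    refine (PySem.List.mem_enumerate_iff _ _ _).mpr ⟨m, by omega, ?_⟩
    rw [hzget m hm]
    simp
  -- from a "sync_commit doesn't hit any pair" fact to the filter predicate
  have hpred : ∀ r ∈ reports, (r.lookup "sync_commit").bind (pvSdict pairs).get? = none →
      (match r.lookup "sync_commit" with
       | some c => !(PySem.Set.contains (PySem.Set.ofList (pairs.map pvCommit)) c)
       | none => true) = true := by
    intro r _ hb1
    cases hsc : r.lookup "sync_commit" with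
    | none => simp
    | some c =>
      rw [hsc] at hb1
      simp only [Option.bind_some] at hb1
      have hnc : ¬ c ∈ (PySem.Set.ofList (pairs.map pvCommit)) := by
        intro hmem
        have hc2 : c ∈ pairs.map pvCommit := (PySem.Set.mem_ofList _ _).mp hmem
        rcases List.mem_iff_getElem.mp hc2 with ⟨m, hm, hg⟩
        have hm' : m < pairs.length := by simpa using hm
        have : c = pvCommit (pairs[m]'hm') := by
          rw [← hg]; simp
        rcases pvG_hit pvCommit c pairs 0 none m hm' this with ⟨j, hj, _⟩
        rw [pvSdict_get] at hb1
        rw [hb1] at hj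
        cases hj
      simp [hnc]
  apply le_antisymm
  -- A ≤ B
  · rcases pvOptmax_cases (pvFA (pvSdict pairs) (pvUdict pairs)) reports (-1) with h | ⟨r, hrmem, hfr⟩
    · rw [h]; exact pvOptmax_ge _ _ _
    · set R := pvOptmax (pvFA (pvSdict pairs) (pvUdict pairs)) reports (-1) with hR
      unfold pvFA at hfr
      cases hb1 : (r.lookup "sync_commit").bind (pvSdict pairs).get? with
      | some j =>
        rw [hb1] at hfr
        simp only [Option.some.injEq] at hfr
        rcases Option.bind_eq_some_iff.mp hb1 with ⟨s, hsc, hgs⟩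
        rw [pvSdict_get] at hgs
        rcases pvG_some pvCommit s pairs 0 none j hgs with h' | ⟨m, hm, hj, hs⟩
        · cases h'
        · have hcond : pvCond pairs reports ((m : Int), (pvCommit (pairs[m]'hm), pvUpstream (pairs[m]'hm))) = true := by
            unfold pvCond pvSyncSeen
            have hmem : (some (pvCommit (pairs[m]'hm)) : Option String) ∈ reports.map (fun r => r.lookup "sync_commit") :=
              List.mem_map.mpr ⟨r, hrmem, by rw [hsc, ← hs]⟩
            have := (PySem.Set.contains_iff _ _).mpr ((PySem.Set.mem_ofList _ _).mpr hmem)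
            rw [Bool.or_eq_true]
            exact Or.inl this
          have hfBe : fB ((m : Int), (pvCommit (pairs[m]'hm), pvUpstream (pairs[m]'hm))) = some R := by
            rw [hfB]
            simp only [hcond, if_true]
            rw [← hfr, hj]
            norm_num
          exact pvOptmax_mem_le fB enumL (-1) _ (hmemE m hm) R hfBe
      | none =>
        rw [hb1] at hfr
        simp only at hfr
        rcases Option.bind_eq_some_iff.mp hfr with ⟨u, huh, hgu⟩
        rw [pvUdict_get] at hgu
        rcases pvG_some pvUpstream u pairs 0 none R hgu with h' | ⟨m, hm, hj, hs⟩
        · cases h'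
        · have hcond : pvCond pairs reports ((m : Int), (pvCommit (pairs[m]'hm), pvUpstream (pairs[m]'hm))) = true := by
            unfold pvCond pvUpSeen
            have hrf : r ∈ reports.filter (fun r =>
                match r.lookup "sync_commit" with
                | some c => !(PySem.Set.contains (PySem.Set.ofList (pairs.map pvCommit)) c)
                | none => true) := List.mem_filter.mpr ⟨hrmem, hpred r hrmem hb1⟩
            have hmem : (some (pvUpstream (pairs[m]'hm)) : Option String) ∈
                (reports.filter (fun r =>
                  match r.lookup "sync_commit" with
                  | some c => !(PySem.Set.contains (PySem.Set.ofList (pairs.map pvCommit)) c)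
                  | none => true)).map (fun r => r.lookup "upstream_head_sha") :=
              List.mem_map.mpr ⟨r, hrf, by rw [huh, ← hs]⟩
            have := (PySem.Set.contains_iff _ _).mpr ((PySem.Set.mem_ofList _ _).mpr hmem)
            rw [Bool.or_eq_true]
            exact Or.inr this
          have hfBe : fB ((m : Int), (pvCommit (pairs[m]'hm), pvUpstream (pairs[m]'hm))) = some R := by
            rw [hfB]
            simp only [hcond, if_true]
            rw [hj]
            norm_num
          exact pvOptmax_mem_le fB enumL (-1) _ (hmemE m hm) R hfBe
  -- B ≤ A
  · rcases pvOptmax_cases fB enumL (-1) with h | ⟨e, hemem, hfe⟩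
    · rw [h]; exact pvOptmax_ge _ _ _
    · set R' := pvOptmax fB enumL (-1) with hR'
      rcases (PySem.List.mem_enumerate_iff _ _ _).mp hemem with ⟨m, hmz, he⟩
      have hm : m < pairs.length := by omega
      have he' : e = ((m : Int), (pvCommit (pairs[m]'hm), pvUpstream (pairs[m]'hm))) := by
        rw [he, hzget m hm]; norm_num
      rw [hfB, he'] at hfe
      beta_reduce at hfe
      by_cases hc : pvCond pairs reports ((m : Int), (pvCommit (pairs[m]'hm), pvUpstream (pairs[m]'hm))) = true
      · rw [if_pos hc] at hfe
        simp only [Option.some.injEq] at hfe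
        unfold pvCond at hc
        rcases Bool.or_eq_true_iff.mp hc with hc1 | hc2
        · -- sync side
          unfold pvSyncSeen at hc1
          have hmem := (PySem.Set.mem_ofList _ _).mp ((PySem.Set.contains_iff _ _).mp hc1)
          rcases List.mem_map.mp hmem with ⟨r, hrmem, hlk⟩
          rcases pvG_hit pvCommit (pvCommit (pairs[m]'hm)) pairs 0 none m hm rfl with ⟨j, hj, hmj⟩
          have hfa : pvFA (pvSdict pairs) (pvUdict pairs) r = some j := by
            unfold pvFA
            rw [hlk]
            simp only [Option.bind_some]
            rw [pvSdict_get, hj]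
          have hjle := pvOptmax_mem_le (pvFA (pvSdict pairs) (pvUdict pairs)) reports (-1) r hrmem j hfa
          omega
        · -- upstream side
          unfold pvUpSeen at hc2
          have hmem := (PySem.Set.mem_ofList _ _).mp ((PySem.Set.contains_iff _ _).mp hc2)
          rcases List.mem_map.mp hmem with ⟨r, hrf, hlk⟩
          rcases List.mem_filter.mp hrf with ⟨hrmem, hprd⟩
          rcases pvG_hit pvUpstream (pvUpstream (pairs[m]'hm)) pairs 0 none m hm rfl with ⟨j, hj, hmj⟩
          have hb1 : (r.lookup "sync_commit").bind (pvSdict pairs).get? = none := by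
            cases hsc : r.lookup "sync_commit" with
            | none => simp
            | some c =>
              simp only [Option.bind_some]
              rw [hsc] at hprd
              simp only [Bool.not_eq_true'] at hprd
              have hnc : ¬ c ∈ pairs.map pvCommit := by
                intro hcm
                have := (PySem.Set.contains_iff _ _).mpr ((PySem.Set.mem_ofList _ _).mpr hcm)
                rw [this] at hprd
                cases hprd
              have hmiss : ∀ x ∈ pairs, c ≠ pvCommit x := by
                intro x hx hceq
                exact hnc (List.mem_map.mpr ⟨x, hx, hceq.symm⟩)
              rw [pvSdict_get]
              exact pvG_miss pvCommit c pairs 0 none hmiss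
          have hfa : pvFA (pvSdict pairs) (pvUdict pairs) r = some j := by
            unfold pvFA
            rw [hb1, hlk]
            simp only [Option.bind_some]
            rw [pvUdict_get, hj]
          have hjle := pvOptmax_mem_le (pvFA (pvSdict pairs) (pvUdict pairs)) reports (-1) r hrmem j hfa
          omega
      · rw [if_neg hc] at hfe
        cases hfe

-- ===== VERDICT (by name: the statement is the Claim_ definition above) =====
theorem resolve_existing_pair_index_spec : Claim_equal_resolve_existing_pair_index := by
  intro pairs reports _ _
  unfold Spec_resolve_existing_pair_index
  by_cases hr : reports = []
  · simp [resolve_existing_pair_index, resolve_existing_pair_index_alt, hr]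
  · exact pvMain pairs reports hr
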